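-- pv_equiv track=rewrite | github.com/PhongGuy/ad-block-helper | build.py | find_language
-- ===== SOURCE A (Python) =====
-- def find_language(languages):
--     # https://filterlists.com/api/directory/languages
--
--     if languages:
--         for language in languages:
--             if language not in {
--                 31,  # Danish
--                 37,  # English
--             }:
--                 return False
--     return True
-- ===== SOURCE B (Python) =====
-- def find_language(languages):
--     xs = languages or []
--     return xs.count(31) + xs.count(37) == len(xs)
-- ===== Notes on version B (the rewrite author's own statement) =====
-- stated objective: alternative
-- what changed: Replaces the per-element membership loop with early return by an arithmetic characterisation: the list is all-Danish/English iff count(31) + count(37) equals its length, computed by two list.count passes and one comparison.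
import Mathlib
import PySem

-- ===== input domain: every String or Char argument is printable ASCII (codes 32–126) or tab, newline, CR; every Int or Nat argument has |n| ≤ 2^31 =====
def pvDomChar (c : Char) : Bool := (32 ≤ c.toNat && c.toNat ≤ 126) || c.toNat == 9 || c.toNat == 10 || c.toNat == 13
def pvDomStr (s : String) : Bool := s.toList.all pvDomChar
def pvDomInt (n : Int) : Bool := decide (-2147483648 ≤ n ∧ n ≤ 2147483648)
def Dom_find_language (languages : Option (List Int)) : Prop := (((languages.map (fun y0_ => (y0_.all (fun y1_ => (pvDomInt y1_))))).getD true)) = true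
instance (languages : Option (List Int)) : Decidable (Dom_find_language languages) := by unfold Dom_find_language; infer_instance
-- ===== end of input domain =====

-- B replaces A's per-element membership loop by an arithmetic characterisation: count(31)+count(37) = len (alternative; same cost). 


-- ===== PORT A =====
-- loop body of A: first element outside {31,37} returns False
def findLangLoop : List Int → Bool
  | [] => true
  | x :: xs => if ¬ (x = 31 ∨ x = 37) then false else findLangLoop xs

def find_language (languages : Option (List Int)) : Bool :=
  match languages with
  | none => true
  | some l => if l.isEmpty then true else findLangLoop l

-- ===== PORT B =====
-- B: xs = languages or []; return xs.count(31) + xs.count(37) == len(xs)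
def find_language_alt (languages : Option (List Int)) : Bool :=
  let xs := match languages with
    | none => []
    | some l => if l.isEmpty then [] else l
  decide (PySem.List.count xs 31 + PySem.List.count xs 37 = xs.length)

-- ===== PRECONDITION & SPEC =====
def Spec_find_language (languages : Option (List Int)) (out : Bool) : Prop := out = find_language_alt languages
instance (languages : Option (List Int)) (out : Bool) : Decidable (Spec_find_language languages out) := by unfold Spec_find_language; infer_instance

-- ===== CLAIM =====
def Claim_equal_find_language : Prop := ∀ (languages : Option (List Int)), Dom_find_language languages → Spec_find_language languages (find_language languages)

-- ===== LEMMAS AND PROOFS =====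
theorem count_add_le (xs : List Int) :
    List.count 31 xs + List.count 37 xs ≤ xs.length := by
  induction xs with
  | nil => simp
  | cons x xs ih => simp only [List.count_cons, List.length_cons]; split_ifs <;> simp_all <;> omega

theorem findLangLoop_eq_count (l : List Int) :
    findLangLoop l = decide (PySem.List.count l 31 + PySem.List.count l 37 = l.length) := by
  induction l with
  | nil => simp [findLangLoop, PySem.List.count]
  | cons x xs ih =>
    have hle := count_add_le xs
    simp only [findLangLoop, PySem.List.count_eq] at *
    by_cases h : x = 31 ∨ x = 37
    · rw [if_neg (not_not.mpr h)]
      rcases h with h | h <;> subst h <;> rw [ih] <;>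
        simp <;> omega
    · rw [if_pos h]
      have hx31 : (x == (31 : Int)) = false := by simp; tauto
      have hx37 : (x == (37 : Int)) = false := by simp; tauto
      simp [List.count_cons, hx31, hx37]
      omega

-- ===== VERDICT =====
theorem find_language_spec : Claim_equal_find_language := by
  intro languages _
  unfold Spec_find_language find_language find_language_alt
  cases languages with
  | none => rfl
  | some l =>
    by_cases h : l.isEmpty <;>
      simp [h, findLangLoop_eq_count, PySem.List.count]
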